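-- pv_equiv track=rewrite | github.com/ZeinabTaghavi/SAADI_late-chunking | chunked_pooling/experiment_chunking.py | _fixed_token_spans
-- ===== SOURCE A (Python) =====
-- from typing import Dict, Iterable, List, Sequence, Tuple
--
-- def _fixed_token_spans(
--     token_count: int,
--     chunk_size: int,
--     overlap: int,
-- ) -> List[Tuple[int, int]]:
--     if chunk_size is None or chunk_size < 1:
--         raise ValueError("chunk_size must be >= 1 for fixed chunking.")
--     if overlap < 0 or overlap >= chunk_size:
--         raise ValueError("overlap must be >= 0 and < chunk_size.")
--     if token_count == 0:
--         return []
--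
--     spans = []
--     step = chunk_size - overlap
--     start = 0
--     while start < token_count:
--         end = min(start + chunk_size, token_count)
--         spans.append((start, end))
--         if end >= token_count:
--             break
--         start += step
--     return spans
-- ===== SOURCE B (Python) =====
-- from typing import List, Tuple
--
-- def _fixed_token_spans(
--     token_count: int,
--     chunk_size: int,
--     overlap: int,
-- ) -> List[Tuple[int, int]]:
--     if chunk_size is None or chunk_size < 1:
--         raise ValueError("chunk_size must be >= 1 for fixed chunking.")
--     if overlap < 0 or overlap >= chunk_size:
--         raise ValueError("overlap must be >= 0 and < chunk_size.")
--     if token_count <= 0: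
--         return []
--     step = chunk_size - overlap
--     # n = 1 + max(0, ceil((token_count - chunk_size) / step)), computed with floor division
--     n = 1 + max(0, -((chunk_size - token_count) // step))
--     return [(k * step, min(k * step + chunk_size, token_count)) for k in range(n)]
-- ===== Notes on version B (the rewrite author's own statement) =====
-- stated objective: alternative
-- what changed: Replaced the while/break span loop with a closed-form chunk count n = 1 + max(0, ceil((token_count - chunk_size)/step)) and a single comprehension over range(n).
import Mathlib
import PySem

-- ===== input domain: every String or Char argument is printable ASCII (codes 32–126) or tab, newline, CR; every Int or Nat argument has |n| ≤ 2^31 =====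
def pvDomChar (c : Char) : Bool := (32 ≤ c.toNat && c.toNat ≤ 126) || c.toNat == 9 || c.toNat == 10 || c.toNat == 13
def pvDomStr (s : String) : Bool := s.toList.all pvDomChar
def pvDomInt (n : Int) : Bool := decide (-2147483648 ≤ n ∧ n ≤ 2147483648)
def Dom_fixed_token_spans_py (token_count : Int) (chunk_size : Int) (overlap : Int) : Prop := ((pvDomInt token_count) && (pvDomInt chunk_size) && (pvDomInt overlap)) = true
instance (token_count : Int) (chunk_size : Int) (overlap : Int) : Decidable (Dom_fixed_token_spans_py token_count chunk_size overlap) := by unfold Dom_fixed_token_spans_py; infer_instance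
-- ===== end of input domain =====

-- B replaces A's while/break loop by a closed-form chunk count and a comprehension over range(n) (objective: alternative decomposition, same cost).

-- ===== PORT A =====
-- While loop of A; the '0 < step' conjunct is a totality guard only (under Pre_ step = chunk_size - overlap > 0, as in the Python).
def pvALoop (tc cs step start : Int) : List (Int × Int) :=
  if h : 0 < step ∧ start < tc then
    let e := min (start + cs) tc
    if tc ≤ e then [(start, e)]
    else (start, e) :: pvALoop tc cs step (start + step)
  else []
termination_by (tc - start).toNat
decreasing_by
  simp only [not_le, lt_min_iff] at *
  omega

def fixed_token_spans_py (token_count : Int) (chunk_size : Int) (overlap : Int) : List (Int × Int) :=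
  if chunk_size < 1 then []                                -- Python raises ValueError (outside Pre_)
  else if overlap < 0 ∨ chunk_size ≤ overlap then []       -- Python raises ValueError (outside Pre_)
  else if token_count = 0 then []
  else pvALoop token_count chunk_size (chunk_size - overlap) 0

-- ===== PORT B =====
def fixed_token_spans_py_alt (token_count : Int) (chunk_size : Int) (overlap : Int) : List (Int × Int) :=
  if chunk_size < 1 then []                                -- Python raises ValueError (outside Pre_)
  else if overlap < 0 ∨ chunk_size ≤ overlap then []       -- Python raises ValueError (outside Pre_)
  else if token_count ≤ 0 then []
  else
    let step := chunk_size - overlap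
    let n := 1 + max 0 (-(PySem.Int.floordiv (chunk_size - token_count) step))
    (PySem.List.pyRange 0 n 1).map (fun k => (k * step, min (k * step + chunk_size) token_count))

-- ===== PRECONDITION & SPEC =====
-- Pre_ excludes exactly the inputs on which Python A raises ValueError (chunk_size < 1, or overlap out of [0, chunk_size)).
def Pre_fixed_token_spans_py (token_count : Int) (chunk_size : Int) (overlap : Int) : Prop :=
  1 ≤ chunk_size ∧ 0 ≤ overlap ∧ overlap < chunk_size

instance (token_count : Int) (chunk_size : Int) (overlap : Int) : Decidable (Pre_fixed_token_spans_py token_count chunk_size overlap) := by unfold Pre_fixed_token_spans_py; infer_instance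

def pvWitness_fixed_token_spans_py : Int × Int × Int := (10, 4, 1)

def Spec_fixed_token_spans_py (token_count : Int) (chunk_size : Int) (overlap : Int) (out : List (Int × Int)) : Prop := out = fixed_token_spans_py_alt token_count chunk_size overlap
instance (token_count : Int) (chunk_size : Int) (overlap : Int) (out : List (Int × Int)) : Decidable (Spec_fixed_token_spans_py token_count chunk_size overlap out) := by unfold Spec_fixed_token_spans_py; infer_instance

-- ===== CLAIM (what is proved, stated in full; the proofs are below) =====
def Claim_equal_fixed_token_spans_py : Prop := ∀ (token_count : Int) (chunk_size : Int) (overlap : Int), Dom_fixed_token_spans_py token_count chunk_size overlap → Pre_fixed_token_spans_py token_count chunk_size overlap → Spec_fixed_token_spans_py token_count chunk_size overlap (fixed_token_spans_py token_count chunk_size overlap)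

-- ===== LEMMAS AND PROOFS =====

-- the last chunk (index k) is the first one whose end reaches token_count
lemma pv_key (tc cs ov k : Int) (hlt : ov < cs) (hk : 0 ≤ k) :
    tc ≤ k * (cs - ov) + cs ↔
      1 + max 0 (-(PySem.Int.floordiv (cs - tc) (cs - ov))) ≤ k + 1 := by
  have hstep : (0:Int) < cs - ov := by omega
  have h := PySem.Int.le_floordiv_iff_mul_le (q := -k) (a := cs - tc) (b := cs - ov) hstep
  constructor
  · intro hle
    have : -k ≤ PySem.Int.floordiv (cs - tc) (cs - ov) := h.mpr (by nlinarith)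
    omega
  · intro hn
    have : -k ≤ PySem.Int.floordiv (cs - tc) (cs - ov) := by omega
    have := h.mp this
    nlinarith

lemma pv_aLoop_eq (tc cs ov : Int) (hcs : 1 ≤ cs) (hov : 0 ≤ ov) (hlt : ov < cs) :
    ∀ (m : Nat) (k : Int), (tc - k * (cs - ov)).toNat ≤ m → 0 ≤ k →
      k < 1 + max 0 (-(PySem.Int.floordiv (cs - tc) (cs - ov))) →
      k * (cs - ov) < tc →
      pvALoop tc cs (cs - ov) (k * (cs - ov)) =
        (PySem.List.pyRange k (1 + max 0 (-(PySem.Int.floordiv (cs - tc) (cs - ov)))) 1).map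
          (fun j => (j * (cs - ov), min (j * (cs - ov) + cs) tc)) := by
  have hstep : (0:Int) < cs - ov := by omega
  intro m
  induction m with
  | zero =>
      intro k hm hk _ hlt'
      omega
  | succ m ih =>
      intro k hm hk hkn hlt'
      set n := 1 + max 0 (-(PySem.Int.floordiv (cs - tc) (cs - ov))) with hn
      rw [pvALoop]
      rw [dif_pos ⟨hstep, hlt'⟩]
      by_cases hbrk : tc ≤ min (k * (cs - ov) + cs) tc
      · rw [if_pos hbrk]
        have hend : tc ≤ k * (cs - ov) + cs := by omega
        have hle : n ≤ k + 1 := (pv_key tc cs ov k hlt hk).mp hend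
        have hneq : n = k + 1 := by omega
        rw [hneq, PySem.List.pyRange_one_singleton]
        simp
      · rw [if_neg hbrk]
        have hend : ¬ tc ≤ k * (cs - ov) + cs := by omega
        have hk1n : k + 1 < n := by
          have := (pv_key tc cs ov k hlt hk).not.mp hend
          omega
        have hnext : (k + 1) * (cs - ov) < tc := by nlinarith
        have harg : k * (cs - ov) + (cs - ov) = (k + 1) * (cs - ov) := by ring
        have hmeas : (tc - (k + 1) * (cs - ov)).toNat ≤ m := by
          have hs : k * (cs - ov) + 1 ≤ (k + 1) * (cs - ov) := by nlinarith
          omega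
        rw [harg, ih (k + 1) hmeas (by omega) hk1n hnext]
        rw [PySem.List.pyRange_one_cons (by omega : k < n)]
        simp

-- ===== VERDICT (by name: the statement is the Claim_ definition above) =====
theorem fixed_token_spans_py_spec : Claim_equal_fixed_token_spans_py := by
  intro tc cs ov _ hpre
  obtain ⟨hcs, hov, hlt⟩ := hpre
  unfold Spec_fixed_token_spans_py fixed_token_spans_py fixed_token_spans_py_alt
  have h1 : ¬ (cs < 1) := by omega
  have h2 : ¬ (ov < 0 ∨ cs ≤ ov) := by rintro (h | h) <;> omega
  rw [if_neg h1, if_neg h2, if_neg h1, if_neg h2]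
  by_cases htc : tc = 0
  · subst htc; norm_num
  · rw [if_neg htc]
    by_cases hpos : tc ≤ 0
    · rw [if_pos hpos, pvALoop, dif_neg (by omega)]
    · rw [if_neg hpos]
      have h0 := pv_aLoop_eq tc cs ov hcs hov hlt (tc - 0 * (cs - ov)).toNat 0 (le_refl _)
        (le_refl 0) (by omega) (by omega)
      simpa using h0
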